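-- pv_equiv track=rewrite | github.com/theawesomew/SLAM-Implementation | utils/mapping.py | parseMapData
-- ===== SOURCE A (Python) =====
-- from math import sqrt
--
-- def parseMapData (str):
--     MAP = []
--
--     # compute the side-length of the map as a function of the mapstring's length
--     # all maps are square & therefore are suited to the map string representation without
--     # the need to input a dimension
--     sideLength = int(sqrt(len(str)))
--
--     # iterate through the string & construct a matrix
--     for i in range(sideLength):
--         # append a new list for every row
--         MAP.append([])
--         for j in range(sideLength):
--             # input the digit at position (x,y) if this string were interpreted as a list of co-ordinates
--             # this is done simply by multiplying the y-value by the side-length & adding the x-value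
--             MAP[i].append(int(str[i*sideLength+j]))
--
--     return MAP
-- ===== SOURCE B (Python) =====
-- from math import sqrt
--
-- def parseMapData(str):
--     # parse-then-reshape: one flat pass of digit conversion, then slice into rows
--     sideLength = int(sqrt(len(str)))
--     digits = [int(c) for c in str[:sideLength * sideLength]]
--     return [digits[k * sideLength:(k + 1) * sideLength] for k in range(sideLength)]
-- ===== Notes on version B (the rewrite author's own statement) =====
-- stated objective: simpler
-- what changed: B replaces A's nested index-arithmetic loops (i*sideLength+j into the string for every cell) with a flat single pass converting the prefix to ints followed by reshaping that flat list into rows by slicing.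
import Mathlib
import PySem

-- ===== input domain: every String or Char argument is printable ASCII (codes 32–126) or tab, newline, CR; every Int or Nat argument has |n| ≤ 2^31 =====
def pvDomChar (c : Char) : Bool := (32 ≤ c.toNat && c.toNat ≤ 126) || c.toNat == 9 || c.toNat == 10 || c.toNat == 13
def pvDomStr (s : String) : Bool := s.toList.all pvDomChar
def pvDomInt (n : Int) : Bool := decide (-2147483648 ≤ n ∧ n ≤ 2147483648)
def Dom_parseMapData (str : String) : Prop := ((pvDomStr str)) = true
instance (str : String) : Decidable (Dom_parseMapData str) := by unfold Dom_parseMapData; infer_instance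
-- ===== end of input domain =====

-- B replaces A's nested index-arithmetic loops with one flat digit-conversion pass plus
-- reshaping by slices; same O(n) cost, different decomposition.

-- ===== PORT A =====
-- pvISqrt m = int(sqrt(m)) = Nat.sqrt m (proved below as pvISqrt_eq); written as a
-- structural fold so the kernel can evaluate it
def pvISqrt (m : Nat) : Nat :=
  (List.range (m + 1)).foldl (fun a k => if k * k ≤ m then k else a) 0

-- sideLength = int(sqrt(len(str))) is ported as pvISqrt of the length, written out at each use site
def parseMapData (str : String) : List (List Int) :=
  (PySem.List.pyRange 0 (pvISqrt str.toList.length : Int) 1).foldl (fun MAP i =>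
    MAP ++ [(PySem.List.pyRange 0 (pvISqrt str.toList.length : Int) 1).foldl (fun row j =>
      row ++ [(((PySem.Str.pyGet? str (i * (pvISqrt str.toList.length : Int) + j)).bind
                  (fun c => PySem.Int.ofChars? [c])).getD 0)]) []]) []

-- ===== PORT B =====
def pvDigits (str : String) (n : Nat) : List Int :=
  (str.toList.take (n * n)).map (fun c => (PySem.Int.ofChars? [c]).getD 0)

def parseMapData_alt (str : String) : List (List Int) :=
  (List.range (pvISqrt str.toList.length)).map (fun k =>
    ((pvDigits str (pvISqrt str.toList.length)).drop (k * pvISqrt str.toList.length)).take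
      (pvISqrt str.toList.length))

-- ===== PRECONDITION & SPEC =====
-- Pre_ excludes exactly the inputs where int(str[i]) raises ValueError: a non-digit
-- character among the first sideLength^2 characters.
def Pre_parseMapData (str : String) : Prop :=
  (str.toList.take (pvISqrt str.toList.length * pvISqrt str.toList.length)).all
    Char.isDigit = true
instance (str : String) : Decidable (Pre_parseMapData str) := by unfold Pre_parseMapData; infer_instance
def pvWitness_parseMapData : String := "1234"

def Spec_parseMapData (str : String) (out : List (List Int)) : Prop := out = parseMapData_alt str
instance (str : String) (out : List (List Int)) : Decidable (Spec_parseMapData str out) := by unfold Spec_parseMapData; infer_instance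

-- ===== CLAIM (what is proved, stated in full; the proofs are below) =====
def Claim_equal_parseMapData : Prop := ∀ (str : String), Dom_parseMapData str → Pre_parseMapData str → Spec_parseMapData str (parseMapData str)

-- ===== LEMMAS AND PROOFS =====

theorem pvISqrt_eq (m : Nat) : pvISqrt m = Nat.sqrt m := by
  have key : ∀ t, (List.range (t + 1)).foldl (fun a k => if k * k ≤ m then k else a) 0
      = min (Nat.sqrt m) t := by
    intro t
    induction t with
    | zero => simp
    | succ s ih =>
      rw [List.range_succ, List.foldl_append]
      simp only [List.foldl_cons, List.foldl_nil]
      by_cases h : (s + 1) * (s + 1) ≤ m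
      · have hle : s + 1 ≤ Nat.sqrt m := Nat.le_sqrt.mpr h
        simp only [if_pos h]
        omega
      · have hlt : Nat.sqrt m ≤ s := by
          by_contra hc
          push_neg at hc
          exact h (Nat.le_sqrt.mp hc)
        rw [if_neg h, ih]
        omega
  unfold pvISqrt
  rw [key m]
  have := Nat.sqrt_le_self m
  omega

-- a slice chunk of a list as a map over indices
theorem chunk_eq_map (l : List Int) (n k : Nat) (h : k * n + n ≤ l.length) :
    (l.drop (k * n)).take n = (List.range n).map (fun j => l.getD (k * n + j) 0) := by
  apply List.ext_getElem
  · simp; omega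
  · intro i h1 h2
    have hi : i < n := by simpa using h2
    have hkl : k * n + i < l.length := by omega
    simp [List.getD, hkl]

-- A's inner loop produces the corresponding row of B
theorem row_eq (str : String) (n : Nat) (hn : n = Nat.sqrt str.toList.length)
    (i : Nat) (hi : i < n) :
    ((List.range n).map (fun (k : Nat) => (k : Int))).foldl (fun row j =>
      row ++ [(((PySem.Str.pyGet? str ((i : Int) * n + j)).bind
                  (fun c => PySem.Int.ofChars? [c])).getD 0)]) []
    = (List.range n).map (fun j =>
        ((pvDigits str n).getD (i * n + j) 0)) := by
  have hlen : n * n ≤ str.toList.length := by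
    have h := Nat.sqrt_le' str.toList.length
    rw [Nat.pow_two] at h; subst hn; exact h
  rw [PySem.List.foldl_append_singleton_eq_map]
  simp only [List.map_map]
  apply List.map_congr_left
  intro j hj
  have hjn : j < n := List.mem_range.mp hj
  have hidx : i * n + j < n * n := by nlinarith
  have hidxl : i * n + j < str.toList.length := by omega
  have hcast : (i : Int) * (n : Int) + (j : Int) = ((i * n + j : Nat) : Int) := by push_cast; ring
  have hget : PySem.Chars.pyGet? str.toList ((i : Int) * n + j) = str.toList[i * n + j]? := by
    rw [hcast]
    show PySem.List.pyGet? str.toList ((i * n + j : Nat) : Int) = _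
    exact PySem.List.pyGet?_natCast str.toList (i * n + j)
  rw [Function.comp_apply]
  simp only [PySem.Str.pyGet?]
  rw [hget, List.getElem?_eq_getElem hidxl]
  simp [pvDigits, List.getD, hidx]
  rw [List.getElem?_eq_getElem hidxl]
  simp

theorem parseMapData_eq (str : String) :
    parseMapData str = parseMapData_alt str := by
  unfold parseMapData parseMapData_alt
  simp only [pvISqrt_eq]
  set n := Nat.sqrt str.toList.length with hn
  have hlen : n * n ≤ str.toList.length := by
    have h := Nat.sqrt_le' str.toList.length
    rw [Nat.pow_two] at h; rw [hn]; exact h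
  rw [PySem.List.foldl_append_singleton_eq_map, PySem.List.pyRange_one]
  simp only [zero_add, Int.sub_zero, Int.toNat_natCast, List.map_map]
  apply List.map_congr_left
  intro i hi
  have hin : i < n := List.mem_range.mp hi
  rw [Function.comp_apply, row_eq str n hn i hin]
  rw [chunk_eq_map]
  simp only [pvDigits, List.length_map, List.length_take]
  have h1 : i * n + n ≤ n * n := by nlinarith
  omega

-- ===== VERDICT (by name: the statement is the Claim_ definition above) =====
theorem parseMapData_spec : Claim_equal_parseMapData := by
  intro str _ _
  exact parseMapData_eq str
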